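-- pv_equiv track=rewrite | github.com/azmsu/twitter-sentiment | buildarff.py | feat6
-- ===== SOURCE A (Python) =====
-- def feat6(tweet):
--     '''
--     finds number of future-tense verbs in tweet
--     :param tweet: string containing tweet
--     :return: number of future-tense verbs in tweet
--     '''
--     count = 0
--     tweet = tweet.lower()
--     lst = tweet.split()
--     for i in range(len(lst)):
--         token = lst[i]
--         index = token.rfind('/')
--         if token[:index] in ['\'ll', 'will', 'gonna']:
--             count += 1
--         elif token[:index] == 'going':
--             if i > len(lst) - 3:
--                 continue
--             next_token = lst[i+1]
--             final_token = lst[i+2]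
--             next_index = next_token.rfind('/')
--             final_index = final_token.rfind('/')
--             if next_token[:next_index] == 'to' and final_token[final_index + 1:] == 'vb':
--                 count += 1
--     return count
-- ===== SOURCE B (Python) =====
-- def feat6(tweet):
--     '''
--     finds number of future-tense verbs in tweet
--     :param tweet: string containing tweet
--     :return: number of future-tense verbs in tweet
--     '''
--     count = 0
--     state = 0  # length of the matched prefix of the pattern (word 'going', word 'to')
--     for token in tweet.lower().split():
--         i = token.rfind('/')
--         word, tag = token[:i], token[i + 1:]
--         if state == 2 and tag == 'vb':
--             count += 1
--         if word in ("'ll", "will", "gonna"):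
--             count += 1
--         state = 1 if word == 'going' else (2 if state == 1 and word == 'to' else 0)
--     return count
-- ===== Notes on version B (the rewrite author's own statement) =====
-- stated objective: alternative
-- what changed: B replaces A's indexed loop with two-token lookahead by a streaming finite-state matcher: it keeps only a state recording how much of the going-to prefix just matched and counts a construct when the verb-tagged third token arrives in the accepting state, so it never indexes ahead and needs no length-bound guard.
import Mathlib
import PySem

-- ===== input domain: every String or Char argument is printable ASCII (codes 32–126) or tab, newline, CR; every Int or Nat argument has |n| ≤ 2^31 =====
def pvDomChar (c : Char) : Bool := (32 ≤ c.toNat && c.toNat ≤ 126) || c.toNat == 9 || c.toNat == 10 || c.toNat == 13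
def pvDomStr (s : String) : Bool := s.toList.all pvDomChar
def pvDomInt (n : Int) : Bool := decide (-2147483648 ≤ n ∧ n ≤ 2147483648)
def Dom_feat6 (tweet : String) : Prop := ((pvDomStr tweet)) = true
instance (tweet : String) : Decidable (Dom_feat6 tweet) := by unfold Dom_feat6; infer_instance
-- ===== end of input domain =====

-- B replaces A's indexed loop with two-token lookahead by a streaming finite-state matcher
-- (state = matched prefix length of the pattern (going, to)); alternative decomposition, same cost.


-- ===== PORT A =====
def feat6 (tweet : String) : Int :=
  let lst := PySem.Str.split₀ (PySem.Str.lower tweet)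
  (List.range lst.length).foldl (fun count i =>
    let token := lst.getD i ""
    let index := PySem.Str.rfind token "/"
    if PySem.Str.slice token none (some index) ∈ ["'ll", "will", "gonna"] then
      count + 1
    else if PySem.Str.slice token none (some index) = "going" then
      if (i : Int) > (lst.length : Int) - 3 then count
      else
        let next_token := lst.getD (i + 1) ""
        let final_token := lst.getD (i + 2) ""
        let next_index := PySem.Str.rfind next_token "/"
        let final_index := PySem.Str.rfind final_token "/"
        if PySem.Str.slice next_token none (some next_index) = "to" ∧
           PySem.Str.slice final_token (some (final_index + 1)) none = "vb" then count + 1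
        else count
    else count) 0

-- ===== PORT B =====
def feat6_alt (tweet : String) : Int :=
  let r := (PySem.Str.split₀ (PySem.Str.lower tweet)).foldl
    (fun (st : Int × Int) token =>
      let i := PySem.Str.rfind token "/"
      let word := PySem.Str.slice token none (some i)
      let tag := PySem.Str.slice token (some (i + 1)) none
      let count := if st.2 = 2 ∧ tag = "vb" then st.1 + 1 else st.1
      let count := if word ∈ ["'ll", "will", "gonna"] then count + 1 else count
      let state : Int := if word = "going" then 1 else if st.2 = 1 ∧ word = "to" then 2 else 0
      (count, state)) (0, 0)
  r.1

-- ===== PRECONDITION & SPEC =====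
def Spec_feat6 (tweet : String) (out : Int) : Prop := out = feat6_alt tweet
instance (tweet : String) (out : Int) : Decidable (Spec_feat6 tweet out) := by unfold Spec_feat6; infer_instance

-- ===== CLAIM (what is proved, stated in full; the proofs are below) =====
def Claim_equal_feat6 : Prop := ∀ (tweet : String), Dom_feat6 tweet → Spec_feat6 tweet (feat6 tweet)

-- ===== LEMMAS AND PROOFS =====

-- word / tag of a token, exactly as both programs slice it
def pvWf (t : String) : String := PySem.Str.slice t none (some (PySem.Str.rfind t "/"))
def pvTf (t : String) : String := PySem.Str.slice t (some (PySem.Str.rfind t "/" + 1)) none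

-- per-index increment of A's loop
def pvHA (l : List String) (i : Nat) : Int :=
  if pvWf (l.getD i "") ∈ ["'ll", "will", "gonna"] then 1
  else if pvWf (l.getD i "") = "going" then
    if (i : Int) > (l.length : Int) - 3 then 0
    else if pvWf (l.getD (i + 1) "") = "to" ∧ pvTf (l.getD (i + 2) "") = "vb" then 1
    else 0
  else 0

lemma pv_foldl_hA (l : List String) (r : List Nat) (c : Int) :
    r.foldl (fun count i =>
      let token := l.getD i ""
      let index := PySem.Str.rfind token "/"
      if PySem.Str.slice token none (some index) ∈ ["'ll", "will", "gonna"] then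
        count + 1
      else if PySem.Str.slice token none (some index) = "going" then
        if (i : Int) > (l.length : Int) - 3 then count
        else
          let next_token := l.getD (i + 1) ""
          let final_token := l.getD (i + 2) ""
          let next_index := PySem.Str.rfind next_token "/"
          let final_index := PySem.Str.rfind final_token "/"
          if PySem.Str.slice next_token none (some next_index) = "to" ∧
             PySem.Str.slice final_token (some (final_index + 1)) none = "vb" then count + 1
          else count
      else count) c = c + (r.map (pvHA l)).sum := by
  induction r generalizing c with
  | nil => simp
  | cons i r ih =>
      simp only [List.foldl_cons, List.map_cons, List.sum_cons, ih]
      unfold pvHA pvWf pvTf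
      split_ifs <;> ring

-- per-index indicators: future word, and going-to-vb window starting at i
def pvInd1 (l : List String) (i : Nat) : Int :=
  if pvWf (l.getD i "") ∈ ["'ll", "will", "gonna"] then 1 else 0

def pvInd2 (l : List String) (i : Nat) : Int :=
  if ((i : Int) ≤ (l.length : Int) - 3 ∧ pvWf (l.getD i "") = "going" ∧
      pvWf (l.getD (i + 1) "") = "to" ∧ pvTf (l.getD (i + 2) "") = "vb") then 1 else 0

lemma pv_hA_split (l : List String) (i : Nat) : pvHA l i = pvInd1 l i + pvInd2 l i := by
  unfold pvHA pvInd1 pvInd2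
  by_cases h1 : pvWf (l.getD i "") ∈ (["'ll", "will", "gonna"] : List String)
  · have hng : pvWf (l.getD i "") ≠ "going" := by
      simp only [List.mem_cons] at h1
      rcases h1 with h | h | h | h <;> simp_all
    rw [if_pos h1, if_pos h1, if_neg (by rintro ⟨-, hg, -⟩; exact hng hg)]
    norm_num
  · rw [if_neg h1, if_neg h1]
    by_cases h2 : pvWf (l.getD i "") = "going"
    · rw [if_pos h2]
      by_cases h3 : (i : Int) > (l.length : Int) - 3
      · rw [if_pos h3, if_neg (by rintro ⟨hb, -⟩; omega)]
        norm_num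
      · rw [if_neg h3]
        by_cases h4 : pvWf (l.getD (i + 1) "") = "to" ∧ pvTf (l.getD (i + 2) "") = "vb"
        · rw [if_pos h4, if_pos ⟨by omega, h2, h4.1, h4.2⟩]
          norm_num
        · rw [if_neg h4, if_neg (by rintro ⟨-, -, ha, hb⟩; exact h4 ⟨ha, hb⟩)]
          norm_num
    · rw [if_neg h2, if_neg (by rintro ⟨-, hg, -⟩; exact h2 hg)]
      norm_num

def pvBase (l : List String) : Int :=
  ((List.range l.length).map (fun i => pvInd1 l i + pvInd2 l i)).sum

-- B's state machine, run from state s (0/1/2 = matched prefix length)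
def pvG (s : Int) (l : List String) : Int :=
  match l with
  | [] => 0
  | t :: r =>
      (if s = 2 ∧ pvTf t = "vb" then (1 : Int) else 0) +
      (if pvWf t ∈ ["'ll", "will", "gonna"] then (1 : Int) else 0) +
      pvG (if pvWf t = "going" then 1 else if s = 1 ∧ pvWf t = "to" then 2 else 0) r

lemma pv_foldB (l : List String) (p : Int × Int) :
    (l.foldl (fun (st : Int × Int) token =>
      let i := PySem.Str.rfind token "/"
      let word := PySem.Str.slice token none (some i)
      let tag := PySem.Str.slice token (some (i + 1)) none
      let count := if st.2 = 2 ∧ tag = "vb" then st.1 + 1 else st.1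
      let count := if word ∈ ["'ll", "will", "gonna"] then count + 1 else count
      let state : Int := if word = "going" then 1 else if st.2 = 1 ∧ word = "to" then 2 else 0
      (count, state)) p).1 = p.1 + pvG p.2 l := by
  induction l generalizing p with
  | nil => simp [pvG]
  | cons t r ih =>
      simp only [List.foldl_cons, ih, pvG, pvWf, pvTf]
      split_ifs <;> ring

lemma pvInd1_shift (t : String) (r : List String) (j : Nat) :
    pvInd1 (t :: r) (j + 1) = pvInd1 r j := by
  simp [pvInd1]

lemma pvInd2_shift (t : String) (r : List String) (j : Nat) :
    pvInd2 (t :: r) (j + 1) = pvInd2 r j := by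
  unfold pvInd2
  have hb : ((j + 1 : Nat) : Int) ≤ ((t :: r).length : Int) - 3 ↔ (j : Int) ≤ (r.length : Int) - 3 := by
    simp only [List.length_cons]; push_cast; omega
  have e1 : (t :: r).getD (j + 1) "" = r.getD j "" := rfl
  have e2 : (t :: r).getD (j + 1 + 1) "" = r.getD (j + 1) "" := rfl
  have e3 : (t :: r).getD (j + 1 + 2) "" = r.getD (j + 2) "" := rfl
  simp only [hb, e1, e2, e3]

lemma pvBase_cons (t : String) (r : List String) :
    pvBase (t :: r) = pvInd1 (t :: r) 0 + pvInd2 (t :: r) 0 + pvBase r := by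
  unfold pvBase
  rw [List.length_cons, List.range_succ_eq_map, List.map_cons, List.sum_cons, List.map_map]
  have h : (List.range r.length).map ((fun i => pvInd1 (t :: r) i + pvInd2 (t :: r) i) ∘ Nat.succ)
      = (List.range r.length).map (fun i => pvInd1 r i + pvInd2 r i) := by
    apply List.map_congr_left
    intro j _
    simp only [Function.comp, Nat.succ_eq_add_one, pvInd1_shift, pvInd2_shift]
  rw [h]

lemma pvWf_empty : pvWf "" = "" := by
  have h : (pvWf "").toList = [] := by decide
  exact String.toList_injective h

lemma pvTf_empty : pvTf "" = "" := by
  have h : (pvTf "").toList = [] := by decide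
  exact String.toList_injective h

-- if the window's tail pattern holds from defaults, r really has >= 2 elements
lemma pv_len_ge_two (r : List String) (h0 : pvWf (r.getD 0 "") = "to")
    (h1 : pvTf (r.getD 1 "") = "vb") : 2 ≤ r.length := by
  rcases r with _ | ⟨x, r⟩
  · rw [show (([] : List String).getD 0 "") = "" from rfl, pvWf_empty] at h0
    exact absurd h0 (by decide)
  · rcases r with _ | ⟨y, r⟩
    · rw [show ((x :: [] : List String).getD 1 "") = "" from rfl, pvTf_empty] at h1
      exact absurd h1 (by decide)
    · simp [List.length_cons]

-- characterization of the state machine: pending partial matches + the window count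
lemma pvG_char (l : List String) (s : Int) :
    pvG s l = (if s = 2 ∧ pvTf (l.getD 0 "") = "vb" then (1 : Int) else 0) +
      (if s = 1 ∧ pvWf (l.getD 0 "") = "to" ∧ pvTf (l.getD 1 "") = "vb" then (1 : Int) else 0) +
      pvBase l := by
  induction l generalizing s with
  | nil =>
      have c1 : ¬ (s = 2 ∧ pvTf (([] : List String).getD 0 "") = "vb") := by
        rintro ⟨-, h⟩
        rw [show (([] : List String).getD 0 "") = "" from rfl, pvTf_empty] at h
        exact absurd h (by decide)
      have c2 : ¬ (s = 1 ∧ pvWf (([] : List String).getD 0 "") = "to" ∧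
          pvTf (([] : List String).getD 1 "") = "vb") := by
        rintro ⟨-, h, -⟩
        rw [show (([] : List String).getD 0 "") = "" from rfl, pvWf_empty] at h
        exact absurd h (by decide)
      rw [if_neg c1, if_neg c2]
      simp [pvG, pvBase]
  | cons t r ih =>
      rw [show pvG s (t :: r) =
        (if s = 2 ∧ pvTf t = "vb" then (1 : Int) else 0) +
        (if pvWf t ∈ ["'ll", "will", "gonna"] then (1 : Int) else 0) +
        pvG (if pvWf t = "going" then 1 else if s = 1 ∧ pvWf t = "to" then 2 else 0) r from rfl]
      rw [pvBase_cons]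
      have hd0 : (t :: r).getD 0 "" = t := rfl
      have hd1 : (t :: r).getD 1 "" = r.getD 0 "" := rfl
      rw [hd0, hd1]
      have hInd1 : pvInd1 (t :: r) 0 = (if pvWf t ∈ ["'ll", "will", "gonna"] then (1 : Int) else 0) := by
        unfold pvInd1
        rfl
      have hInd2 : pvInd2 (t :: r) 0 =
          (if pvWf t = "going" ∧ pvWf (r.getD 0 "") = "to" ∧ pvTf (r.getD 1 "") = "vb"
            then (1 : Int) else 0) := by
        unfold pvInd2
        by_cases hw : pvWf t = "going" ∧ pvWf (r.getD 0 "") = "to" ∧ pvTf (r.getD 1 "") = "vb"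
        · have hlen : 2 ≤ r.length := pv_len_ge_two r hw.2.1 hw.2.2
          have hbnd : ((0 : Nat) : Int) ≤ ((t :: r).length : Int) - 3 := by
            simp only [List.length_cons]; push_cast; omega
          rw [if_pos ⟨hbnd, hw.1, hw.2.1, hw.2.2⟩, if_pos hw]
        · rw [if_neg (by rintro ⟨-, h1, h2, h3⟩; exact hw ⟨h1, h2, h3⟩), if_neg hw]
      rw [hInd1, hInd2]
      by_cases hg : pvWf t = "going"
      · rw [if_pos hg, ih]
        rw [show (if (1 : Int) = 2 ∧ pvTf (r.getD 0 "") = "vb" then (1 : Int) else 0) = 0 from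
              if_neg (by rintro ⟨h, -⟩; norm_num at h)]
        rw [show (if s = 1 ∧ pvWf t = "to" ∧ pvTf (r.getD 0 "") = "vb" then (1 : Int) else 0) = 0 from
              if_neg (by rintro ⟨-, h, -⟩; rw [hg] at h; exact absurd h (by decide))]
        by_cases hq : pvWf (r.getD 0 "") = "to" ∧ pvTf (r.getD 1 "") = "vb"
        · rw [show (if (1 : Int) = 1 ∧ pvWf (r.getD 0 "") = "to" ∧ pvTf (r.getD 1 "") = "vb"
                then (1 : Int) else 0) = 1 from if_pos ⟨rfl, hq.1, hq.2⟩]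
          rw [show (if pvWf t = "going" ∧ pvWf (r.getD 0 "") = "to" ∧ pvTf (r.getD 1 "") = "vb"
                then (1 : Int) else 0) = 1 from if_pos ⟨hg, hq.1, hq.2⟩]
          ring
        · rw [show (if (1 : Int) = 1 ∧ pvWf (r.getD 0 "") = "to" ∧ pvTf (r.getD 1 "") = "vb"
                then (1 : Int) else 0) = 0 from if_neg (by rintro ⟨-, h1, h2⟩; exact hq ⟨h1, h2⟩)]
          rw [show (if pvWf t = "going" ∧ pvWf (r.getD 0 "") = "to" ∧ pvTf (r.getD 1 "") = "vb"
                then (1 : Int) else 0) = 0 from if_neg (by rintro ⟨-, h1, h2⟩; exact hq ⟨h1, h2⟩)]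
          ring
      · rw [if_neg hg]
        rw [show (if pvWf t = "going" ∧ pvWf (r.getD 0 "") = "to" ∧ pvTf (r.getD 1 "") = "vb"
              then (1 : Int) else 0) = 0 from if_neg (by rintro ⟨h, -⟩; exact hg h)]
        by_cases hs : s = 1 ∧ pvWf t = "to"
        · rw [if_pos hs, ih]
          rw [show (if (2 : Int) = 1 ∧ pvWf (r.getD 0 "") = "to" ∧ pvTf (r.getD 1 "") = "vb"
                then (1 : Int) else 0) = 0 from if_neg (by rintro ⟨h, -⟩; norm_num at h)]
          by_cases hv : pvTf (r.getD 0 "") = "vb"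
          · rw [show (if (2 : Int) = 2 ∧ pvTf (r.getD 0 "") = "vb" then (1 : Int) else 0) = 1 from
                  if_pos ⟨rfl, hv⟩]
            rw [show (if s = 1 ∧ pvWf t = "to" ∧ pvTf (r.getD 0 "") = "vb" then (1 : Int) else 0) = 1
                  from if_pos ⟨hs.1, hs.2, hv⟩]
            ring
          · rw [show (if (2 : Int) = 2 ∧ pvTf (r.getD 0 "") = "vb" then (1 : Int) else 0) = 0 from
                  if_neg (by rintro ⟨-, h⟩; exact hv h)]
            rw [show (if s = 1 ∧ pvWf t = "to" ∧ pvTf (r.getD 0 "") = "vb" then (1 : Int) else 0) = 0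
                  from if_neg (by rintro ⟨-, -, h⟩; exact hv h)]
            ring
        · rw [if_neg hs, ih]
          rw [show (if (0 : Int) = 2 ∧ pvTf (r.getD 0 "") = "vb" then (1 : Int) else 0) = 0 from
                if_neg (by rintro ⟨h, -⟩; norm_num at h)]
          rw [show (if (0 : Int) = 1 ∧ pvWf (r.getD 0 "") = "to" ∧ pvTf (r.getD 1 "") = "vb"
                then (1 : Int) else 0) = 0 from if_neg (by rintro ⟨h, -⟩; norm_num at h)]
          rw [show (if s = 1 ∧ pvWf t = "to" ∧ pvTf (r.getD 0 "") = "vb" then (1 : Int) else 0) = 0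
                from if_neg (by rintro ⟨h1, h2, -⟩; exact hs ⟨h1, h2⟩)]
          ring

-- ===== VERDICT (by name: the statement is the Claim_ definition above) =====
theorem feat6_spec : Claim_equal_feat6 := by
  intro tweet _
  unfold Spec_feat6 feat6 feat6_alt
  rw [pv_foldl_hA, pv_foldB, pvG_char]
  have h : (List.range (PySem.Str.split₀ (PySem.Str.lower tweet)).length).map
      (pvHA (PySem.Str.split₀ (PySem.Str.lower tweet)))
      = (List.range (PySem.Str.split₀ (PySem.Str.lower tweet)).length).map
        (fun i => pvInd1 (PySem.Str.split₀ (PySem.Str.lower tweet)) i +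
                  pvInd2 (PySem.Str.split₀ (PySem.Str.lower tweet)) i) := by
    apply List.map_congr_left
    intro i _
    exact pv_hA_split _ i
  rw [h]
  rw [if_neg (show ¬ ((0 : Int) = 2 ∧
        pvTf ((PySem.Str.split₀ (PySem.Str.lower tweet)).getD 0 "") = "vb")
      by rintro ⟨hx, -⟩; norm_num at hx)]
  rw [if_neg (show ¬ ((0 : Int) = 1 ∧
        pvWf ((PySem.Str.split₀ (PySem.Str.lower tweet)).getD 0 "") = "to" ∧
        pvTf ((PySem.Str.split₀ (PySem.Str.lower tweet)).getD 1 "") = "vb")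
      by rintro ⟨hx, -⟩; norm_num at hx)]
  unfold pvBase
  ring
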